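-- pv_equiv track=rewrite | github.com/xnsl291/Algorithms-study | Programmers/py/lev1/대충 만든 자판/solution.py | solution
-- ===== SOURCE A (Python) =====
-- def count_time( string, dic):
--     answer = 0
--     try:
--         for s in string :
--             answer += dic[s]
--         return answer
--     except:
--
--         return -1
--
-- def solution(keymap, targets):
--     dic = dict()
--
--     for i in keymap:
--         for idx, key in enumerate(i):
--             value = idx+1
--
--             if key in list(dic.keys()):
--                 dic[key] = dic.get(key) if dic.get(key)<value else value
--             else:
--                 dic[key] = value
--
--     return [ count_time( i , dic) for i in targets ]
-- ===== SOURCE B (Python) =====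
-- def solution(keymap, targets):
--     # For each character, the cheapest press is the first occurrence (str.find)
--     # minimised across the keymap strings; tabulate this once for every character
--     # appearing in the targets, then sum per target with an early -1 break.
--     def cost(c):
--         best = -1
--         for s in keymap:
--             p = s.find(c)
--             if p != -1 and (best == -1 or p + 1 < best):
--                 best = p + 1
--         return best
--
--     table = {c: cost(c) for c in dict.fromkeys(c for t in targets for c in t)}
--
--     answers = []
--     for t in targets:
--         total = 0
--         for c in t:
--             v = table[c]
--             if v == -1:
--                 total = -1
--                 break
--             total += v
--         answers.append(total)
--     return answers
-- ===== Notes on version B (the rewrite author's own statement) =====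
-- stated objective: alternative
-- what changed: B drops A's occurrence-by-occurrence min-tracking dict over the keymap: it tabulates, once per character appearing in the targets, the minimum over keymap strings of str.find first occurrences, then sums per target with an early -1 break.
import Mathlib
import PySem

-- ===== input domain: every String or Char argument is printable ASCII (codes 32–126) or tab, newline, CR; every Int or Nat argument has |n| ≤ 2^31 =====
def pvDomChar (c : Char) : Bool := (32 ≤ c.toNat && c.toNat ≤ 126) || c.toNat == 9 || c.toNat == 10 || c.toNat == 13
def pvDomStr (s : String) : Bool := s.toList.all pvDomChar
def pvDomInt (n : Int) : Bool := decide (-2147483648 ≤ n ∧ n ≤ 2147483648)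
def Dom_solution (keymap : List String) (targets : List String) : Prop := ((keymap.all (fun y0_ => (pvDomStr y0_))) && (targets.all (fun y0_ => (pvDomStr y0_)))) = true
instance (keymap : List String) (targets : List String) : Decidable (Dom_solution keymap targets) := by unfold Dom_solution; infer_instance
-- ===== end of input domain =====

-- B replaces A's occurrence-by-occurrence min-tracking dict over the keymap by a table
-- built per distinct target character from str.find scans; alternative decomposition.

-- ===== PORT A =====
-- count_time: sum dic[s] over the chars; a missing key (KeyError) yields -1.
def countTimeGo (dic : PySem.Dict Char Int) : List Char → Int → Int
  | [], answer => answer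
  | s :: rest, answer =>
    match dic.get? s with
    | some v => countTimeGo dic rest (answer + v)
    | none => -1

def count_time (string : String) (dic : PySem.Dict Char Int) : Int :=
  countTimeGo dic string.toList 0

def solution (keymap : List String) (targets : List String) : List Int :=
  let dic : PySem.Dict Char Int :=
    keymap.foldl (fun dic i =>
      (PySem.List.enumerate i.toList).foldl (fun dic p =>
        let idx := p.1
        let key := p.2
        let value := idx + 1
        if (PySem.Dict.keys dic).contains key then
          -- key present, so dic.get(key) is an int; the none branch is unreachable
          PySem.Dict.insert dic key
            (match PySem.Dict.get? dic key with
             | some old => if old < value then old else value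
             | none => value)
        else
          PySem.Dict.insert dic key value) dic) PySem.Dict.empty
  targets.map (fun i => count_time i dic)

-- ===== PORT B =====
def costB (keymap : List String) (c : Char) : Int :=
  keymap.foldl (fun best s =>
    let p := PySem.Str.find s (String.ofList [c])
    if p ≠ -1 ∧ (best = -1 ∨ p + 1 < best) then p + 1 else best) (-1)

-- table = {c: cost(c) for c in dict.fromkeys(c for t in targets for c in t)}
def tableB (keymap : List String) (targets : List String) : PySem.Dict Char Int :=
  (PySem.List.dedup (targets.flatMap (fun t => t.toList))).foldl
    (fun d c => PySem.Dict.insert d c (costB keymap c)) PySem.Dict.empty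

def sumTargetGo (table : PySem.Dict Char Int) : List Char → Int → Int
  | [], total => total
  | c :: rest, total =>
    -- table[c]; every c of a target is a key of the table, so the getD default is unreachable
    let v := (PySem.Dict.get? table c).getD 0
    if v = -1 then -1 else sumTargetGo table rest (total + v)

def solution_alt (keymap : List String) (targets : List String) : List Int :=
  let table := tableB keymap targets
  targets.map (fun t => sumTargetGo table t.toList 0)

-- ===== PRECONDITION & SPEC =====
def Spec_solution (keymap : List String) (targets : List String) (out : List Int) : Prop := out = solution_alt keymap targets
instance (keymap : List String) (targets : List String) (out : List Int) : Decidable (Spec_solution keymap targets out) := by unfold Spec_solution; infer_instance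

-- ===== CLAIM (what is proved, stated in full; the proofs are below) =====
def Claim_equal_solution : Prop := ∀ (keymap : List String) (targets : List String), Dom_solution keymap targets → Spec_solution keymap targets (solution keymap targets)

-- ===== LEMMAS AND PROOFS =====

-- first index of c in a char list
def fIdx (c : Char) : List Char → Option Nat
  | [] => none
  | h :: t => if h = c then some 0 else (fIdx c t).map (· + 1)

-- running minimum as an option
def omerge (o : Option Int) (v : Int) : Option Int :=
  some (match o with | none => v | some w => min w v)

-- the step A's dict update induces on the value stored at c
def mStep (c : Char) (o : Option Int) (p : Int × Char) : Option Int :=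
  if p.2 = c then omerge o (p.1 + 1) else o

-- canonical minimal press cost of c over the whole keymap (none = absent)
def mOpt (keymap : List String) (c : Char) : Option Int :=
  keymap.foldl (fun o s =>
    match fIdx c s.toList with
    | none => o
    | some i => omerge o ((i : Int) + 1)) none

-- the dict-update step of A, as a standalone function (identical to the lambda in `solution`)
def stepA (dic : PySem.Dict Char Int) (p : Int × Char) : PySem.Dict Char Int :=
  let idx := p.1
  let key := p.2
  let value := idx + 1
  if (PySem.Dict.keys dic).contains key then
    PySem.Dict.insert dic key
      (match PySem.Dict.get? dic key with
       | some old => if old < value then old else value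
       | none => value)
  else
    PySem.Dict.insert dic key value

-- A's full dict
def buildDict (keymap : List String) : PySem.Dict Char Int :=
  keymap.foldl (fun dic i => (PySem.List.enumerate i.toList).foldl stepA dic) PySem.Dict.empty

-- the option-level step of one keymap string, as used by mOpt
def strStep (c : Char) (o : Option Int) (s : String) : Option Int :=
  match fIdx c s.toList with
  | none => o
  | some i => omerge o ((i : Int) + 1)

theorem solution_eq_buildDict (keymap targets : List String) :
    solution keymap targets = targets.map (fun i => count_time i (buildDict keymap)) := rfl

-- find of a single-char needle is the first index
theorem go_singleton (c : Char) : ∀ (l : List Char) (k : Nat),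
    PySem.Chars.find.go [c] l k =
      (match fIdx c l with | none => -1 | some i => ((i : Int) + k)) := by
  intro l
  induction l with
  | nil => intro k; simp [PySem.Chars.find.go, fIdx]
  | cons h t ih =>
    intro k
    rw [PySem.Chars.find.go]
    by_cases hc : h = c
    · subst hc
      simp [List.isPrefixOf, fIdx]
    · have hne : ([c].isPrefixOf (h :: t)) = false := by
        simp [List.isPrefixOf]
        intro hch; exact absurd hch.symm hc
      rw [hne]
      simp only [Bool.false_eq_true, if_false]
      rw [ih (k + 1)]
      simp [fIdx, hc]
      cases fIdx c t with
      | none => rfl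
      | some i => simp; ring
 
theorem find_singleton (c : Char) (s : String) :
    PySem.Str.find s (String.ofList [c]) =
      (match fIdx c s.toList with | none => -1 | some i => (i : Int)) := by
  rw [PySem.Str.find_eq]
  have h0 : (String.ofList [c]).toList = [c] := by simp
  rw [h0]
  show PySem.Chars.find.go [c] s.toList 0 = _
  rw [go_singleton]
  cases fIdx c s.toList <;> simp

-- folding further (larger) positions over an already-small minimum changes nothing
theorem stay (c : Char) : ∀ (t : List Char) (s : Int) (m : Int), m ≤ s →
    (PySem.List.enumerate t s).foldl (mStep c) (some m) = some m := by
  intro t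
  induction t with
  | nil => intro s m _; simp [PySem.List.enumerate]
  | cons h t ih =>
    intro s m hm
    rw [PySem.List.enumerate_cons]
    simp only [List.foldl_cons]
    by_cases hc : h = c
    · have : mStep c (some m) (s, h) = some m := by
        simp [mStep, hc, omerge]
        omega
      rw [this]; exact ih (s + 1) m (by omega)
    · have : mStep c (some m) (s, h) = some m := by simp [mStep, hc]
      rw [this]; exact ih (s + 1) m (by omega)

-- the option-level fold over one enumerated string is the merge of its first occurrence
theorem enumFold (c : Char) : ∀ (l : List Char) (s : Int) (o : Option Int),
    (PySem.List.enumerate l s).foldl (mStep c) o =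
      (match fIdx c l with | none => o | some i => omerge o (s + i + 1)) := by
  intro l
  induction l with
  | nil => intro s o; simp [PySem.List.enumerate, fIdx]
  | cons h t ih =>
    intro s o
    rw [PySem.List.enumerate_cons]
    simp only [List.foldl_cons]
    by_cases hc : h = c
    · have h1 : mStep c o (s, h) = omerge o (s + 1) := by simp [mStep, hc]
      rw [h1]
      have h2 : ∃ m, omerge o (s + 1) = some m ∧ m ≤ s + 1 := by
        cases o with
        | none => exact ⟨s + 1, rfl, le_refl _⟩
        | some w => exact ⟨min w (s + 1), rfl, min_le_right _ _⟩
      obtain ⟨m, hm, hle⟩ := h2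
      rw [hm, stay c t (s + 1) m hle, ← hm]
      simp [fIdx, hc]
    · have h1 : mStep c o (s, h) = o := by simp [mStep, hc]
      rw [h1, ih (s + 1) o]
      simp [fIdx, hc]
      cases fIdx c t with
      | none => rfl
      | some i => simp; ring_nf

-- one A-update changes the value stored at c exactly by mStep
theorem stepA_get (c : Char) (d : PySem.Dict Char Int) (p : Int × Char) :
    (stepA d p).get? c = mStep c (d.get? c) p := by
  obtain ⟨s, h⟩ := p
  by_cases hc : h = c
  · subst hc
    simp only [stepA, mStep]
    by_cases hmem : (PySem.Dict.keys d).contains h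
    · rw [if_pos hmem]
      have hcont : d.contains h = true :=
        (PySem.Dict.contains_iff_mem_keys d h).2 (by simpa using hmem)
      rw [PySem.Dict.contains_eq_isSome_get?] at hcont
      cases hget : d.get? h with
      | none => rw [hget] at hcont; simp at hcont
      | some old =>
        simp only [PySem.Dict.get?_insert, omerge, if_true]
        congr 1
        rw [min_def]
        split_ifs <;> omega
    · rw [if_neg hmem]
      have hcont : d.contains h = false := by
        by_contra hcc
        have := (PySem.Dict.contains_iff_mem_keys d h).1 (by simpa using hcc)
        exact hmem (by simpa using this)
      have hget : d.get? h = none := (PySem.Dict.get?_eq_none_iff_contains d h).2 hcont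
      rw [hget]
      simp [omerge]
  · have hmS : mStep c (d.get? c) (s, h) = d.get? c := by simp [mStep, hc]
    rw [hmS]
    simp only [stepA]
    split_ifs <;> simp [PySem.Dict.get?_insert, Ne.symm hc]

-- the dict fold over one string, observed at c, is the option fold
theorem innerFold_get (c : Char) (l : List Char) : ∀ (s : Int) (d : PySem.Dict Char Int),
    ((PySem.List.enumerate l s).foldl stepA d).get? c =
      (PySem.List.enumerate l s).foldl (mStep c) (d.get? c) := by
  induction l with
  | nil => intro s d; simp [PySem.List.enumerate]
  | cons h t ih =>
    intro s d
    rw [PySem.List.enumerate_cons]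
    simp only [List.foldl_cons]
    rw [ih (s + 1) (stepA d (s, h)), stepA_get]

-- A's dict, observed at c, is exactly the canonical minimum
theorem buildDict_get (keymap : List String) (c : Char) :
    (buildDict keymap).get? c = mOpt keymap c := by
  have main : ∀ (km : List String) (d : PySem.Dict Char Int),
      (km.foldl (fun dic i => (PySem.List.enumerate i.toList).foldl stepA dic) d).get? c =
        km.foldl (strStep c) (d.get? c) := by
    intro km
    induction km with
    | nil => intro d; simp
    | cons i t ih =>
      intro d
      simp only [List.foldl_cons]
      rw [ih, innerFold_get, enumFold]
      congr 1
      simp [strStep]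
  rw [buildDict, main keymap PySem.Dict.empty, PySem.Dict.get?_empty]
  rfl

-- joint invariant: B's running best encodes the option fold, whose values stay ≥ 1
theorem costB_inv (c : Char) : ∀ (km : List String) (o : Option Int),
    (∀ v, o = some v → 1 ≤ v) →
    km.foldl (fun best s =>
        let p := PySem.Str.find s (String.ofList [c])
        if p ≠ -1 ∧ (best = -1 ∨ p + 1 < best) then p + 1 else best) (o.getD (-1)) =
      (km.foldl (strStep c) o).getD (-1) ∧
    (∀ v, km.foldl (strStep c) o = some v → 1 ≤ v) := by
  intro km
  induction km with
  | nil => intro o ho; exact ⟨rfl, ho⟩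
  | cons s t ih =>
    intro o ho
    simp only [List.foldl_cons]
    have hstep :
        (let p := PySem.Str.find s (String.ofList [c])
         if p ≠ -1 ∧ (o.getD (-1) = -1 ∨ p + 1 < o.getD (-1)) then p + 1 else o.getD (-1)) =
          (strStep c o s).getD (-1) ∧
        (∀ v, strStep c o s = some v → 1 ≤ v) := by
      rw [find_singleton]
      cases hf : fIdx c s.toList with
      | none =>
        simp only [strStep, hf]
        constructor
        · simp
        · exact ho
      | some i =>
        simp only [strStep, hf]
        cases o with
        | none =>
          constructor
          · simp [omerge]
          · intro v hv
            simp [omerge] at hv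
            omega
        | some w =>
          have hw : 1 ≤ w := ho w rfl
          constructor
          · simp only [Option.getD_some, omerge]
            have hnn : (0:Int) ≤ (i : Int) := Int.natCast_nonneg i
            have hne : ((i : Int) ≠ -1) := by omega
            by_cases hlt : (i : Int) + 1 < w
            · rw [if_pos ⟨hne, Or.inr hlt⟩]
              simp; omega
            · rw [if_neg]
              · simp; omega
              · rintro ⟨-, h2⟩
                rcases h2 with h2 | h2
                · omega
                · exact hlt h2
          · intro v hv
            simp [omerge] at hv
            subst hv
            have : (0:Int) ≤ i := Int.natCast_nonneg i
            omega
    rw [hstep.1]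
    exact ih (strStep c o s) hstep.2

theorem costB_eq (keymap : List String) (c : Char) :
    costB keymap c = (mOpt keymap c).getD (-1) := by
  have := costB_inv c keymap none (by intro v hv; cases hv)
  simpa [costB, mOpt, strStep] using this.1

theorem mOpt_pos (keymap : List String) (c : Char) :
    ∀ v, mOpt keymap c = some v → 1 ≤ v :=
  (costB_inv c keymap none (by intro v hv; cases hv)).2

-- a fold of inserts whose value only depends on the key, observed by get?
theorem get?_foldl_insert_fun (f : Char → Int) (c : Char) : ∀ (L : List Char) (d : PySem.Dict Char Int),
    (L.foldl (fun d x => PySem.Dict.insert d x (f x)) d).get? c =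
      (if c ∈ L then some (f c) else d.get? c) := by
  intro L
  induction L with
  | nil => intro d; simp
  | cons h t ih =>
    intro d
    simp only [List.foldl_cons]
    rw [ih]
    by_cases hct : c ∈ t
    · simp [hct]
    · by_cases hch : c = h
      · subst hch
        simp [hct]
      · simp [hct, hch, PySem.Dict.get?_insert]

-- every character of some target is in the table, with its costB value
theorem tableB_get (keymap : List String) (targets : List String) (c : Char)
    (hc : ∃ t ∈ targets, c ∈ t.toList) :
    (tableB keymap targets).get? c = some (costB keymap c) := by
  obtain ⟨t0, ht0, hct0⟩ := hc
  rw [tableB, get?_foldl_insert_fun]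
  have hmem : c ∈ PySem.List.dedup (targets.flatMap (fun t => t.toList)) := by
    rw [PySem.List.mem_dedup]
    exact List.mem_flatMap.2 ⟨t0, ht0, hct0⟩
  rw [if_pos hmem]

-- per-target agreement, provided every char of the target is tabulated
theorem target_eq (keymap : List String) (table : PySem.Dict Char Int) :
    ∀ (l : List Char) (acc : Int),
    (∀ c ∈ l, table.get? c = some (costB keymap c)) →
    countTimeGo (buildDict keymap) l acc = sumTargetGo table l acc := by
  intro l
  induction l with
  | nil => intro acc _; rfl
  | cons c rest ih =>
    intro acc htab
    have hc := htab c (List.mem_cons_self)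
    have hrest : ∀ c ∈ rest, table.get? c = some (costB keymap c) :=
      fun x hx => htab x (List.mem_cons_of_mem _ hx)
    simp only [countTimeGo, sumTargetGo, hc, Option.getD_some, costB_eq, buildDict_get]
    cases hm : mOpt keymap c with
    | none => simp
    | some v =>
      have hv := mOpt_pos keymap c v hm
      have hne : v ≠ (-1 : Int) := by omega
      simp [hne]
      exact ih _ hrest

-- ===== VERDICT (by name: the statement is the Claim_ definition above) =====
theorem solution_spec : Claim_equal_solution := by
  intro keymap targets _
  show solution keymap targets = solution_alt keymap targets
  rw [solution_eq_buildDict, solution_alt]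
  apply List.map_congr_left
  intro t ht
  exact target_eq keymap (tableB keymap targets) t.toList 0
    (fun c hc => tableB_get keymap targets c ⟨t, ht, hc⟩)
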